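-- pv_equiv track=rewrite | github.com/isaac-970/Pacman | pacman/maps.py | _protected_cells
-- ===== SOURCE A (Python) =====
-- CARDINAL_DIRECTIONS = ((0, -1), (1, 0), (0, 1), (-1, 0))
--
-- PROTECTED_STRUCTURE_TILES = {"T", "=", "H", "h", "1", "2", "3", "4"}
--
-- def _normalized_rows(rows: list[str]) -> list[str]:
--     width = max(len(row) for row in rows)
--     return [row.ljust(width, "#") for row in rows]
--
-- def _protected_cells(rows: list[str]) -> set[tuple[int, int]]:
--     normalized_rows = _normalized_rows(rows)
--     width = len(normalized_rows[0])
--     height = len(normalized_rows)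
--     protected: set[tuple[int, int]] = set()
--
--     for x in range(width):
--         protected.add((x, 0))
--         protected.add((x, height - 1))
--     for y in range(height):
--         protected.add((0, y))
--         protected.add((width - 1, y))
--
--     for y, row in enumerate(normalized_rows):
--         for x, tile in enumerate(row):
--             if tile not in PROTECTED_STRUCTURE_TILES:
--                 continue
--             for delta_x, delta_y in ((0, 0), *CARDINAL_DIRECTIONS):
--                 neighbor_x = x + delta_x
--                 neighbor_y = y + delta_y
--                 if 0 <= neighbor_x < width and 0 <= neighbor_y < height:
--                     protected.add((neighbor_x, neighbor_y))
--
--     return protected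
-- ===== SOURCE B (Python) =====
-- CARDINAL_DIRECTIONS = ((0, -1), (1, 0), (0, 1), (-1, 0))
--
-- PROTECTED_STRUCTURE_TILES = {"T", "=", "H", "h", "1", "2", "3", "4"}
--
-- def _protected_cells(rows):
--     width = max(len(row) for row in rows)
--     grid = [row.ljust(width, "#") for row in rows]
--     height = len(grid)
--
--     def protected(x, y):
--         if x == 0 or x == width - 1 or y == 0 or y == height - 1:
--             return True
--         if grid[y][x] in PROTECTED_STRUCTURE_TILES:
--             return True
--         for delta_x, delta_y in CARDINAL_DIRECTIONS:
--             neighbor_x = x + delta_x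
--             neighbor_y = y + delta_y
--             if (0 <= neighbor_x < width and 0 <= neighbor_y < height
--                     and grid[neighbor_y][neighbor_x] in PROTECTED_STRUCTURE_TILES):
--                 return True
--         return False
--
--     return {(x, y) for y in range(height) for x in range(width) if protected(x, y)}
-- ===== Notes on version B (the rewrite author's own statement) =====
-- stated objective: alternative
-- what changed: A scatters: two border-insertion loops into a mutable set, then every structure tile marks its plus-shaped neighbourhood outward; B gathers: a single comprehension over the cells in which each cell decides for itself whether it is on the border, is a structure tile, or has an in-bounds cardinal neighbor that is one.
-- intended difference: On nonempty inputs whose rows are all empty strings (zero-width grid), A returns the phantom out-of-grid cells {(0, y), (-1, y) for each row y} while B returns the empty set, the intended value for a grid with no cells. — e.g. on _protected_cells([""]): A returns [(-1, 0), (0, 0)], B returns []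
import Mathlib
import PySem

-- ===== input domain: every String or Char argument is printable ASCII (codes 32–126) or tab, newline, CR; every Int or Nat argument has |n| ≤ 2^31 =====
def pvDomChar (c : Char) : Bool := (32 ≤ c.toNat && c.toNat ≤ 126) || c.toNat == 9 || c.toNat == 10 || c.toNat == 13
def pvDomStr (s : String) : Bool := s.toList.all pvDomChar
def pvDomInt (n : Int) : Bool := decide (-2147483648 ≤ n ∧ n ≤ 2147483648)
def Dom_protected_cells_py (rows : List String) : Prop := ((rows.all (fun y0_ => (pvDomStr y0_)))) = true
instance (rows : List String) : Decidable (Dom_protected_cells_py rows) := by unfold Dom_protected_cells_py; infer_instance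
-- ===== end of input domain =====

-- B replaces A's scatter (each structure tile marks its plus-neighbourhood into a growing set,
-- after two border-insertion loops) by a gather: one pass over the cells, each cell testing for
-- itself whether it is border, a structure, or cardinally adjacent to one (objective: alternative).
-- Both Pythons return a SET (unordered); each port emits that set in canonical ascending
-- lexicographic order via pvCanon — exact as a finite set, which is all a Python set is.

-- shared module constants / primitives
-- str.ljust(w, "#"): exact hand port (Python appends max(0, w - len(s)) fill characters)
def pvLjustHash (s : String) (w : Int) : String :=
  String.ofList (s.toList ++ List.replicate (w - (s.toList.length : Int)).toNat '#')

def pvTiles : PySem.Set Char := PySem.Set.ofList ['T', '=', 'H', 'h', '1', '2', '3', '4']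

def pvCards : List (Int × Int) := [(0, -1), (1, 0), (0, 1), (-1, 0)]

-- ((0, 0), *CARDINAL_DIRECTIONS)
def pvDeltas : List (Int × Int) := [(0, 0), (0, -1), (1, 0), (0, 1), (-1, 0)]

-- canonical order in which both ports emit the resulting set: ascending lexicographic
def pvCanon (s : List (Int × Int)) : List (Int × Int) :=
  PySem.List.sorted s (fun z => toLex z) false

-- ===== PORT A =====
def pvNormalizedRows (rows : List String) : List String :=
  let width := (PySem.List.max? (rows.map (fun r => PySem.Str.len r)) (fun x => x)).getD 0
  rows.map (fun row => pvLjustHash row width)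

def protected_cells_py (rows : List String) : List (Int × Int) :=
  let normalized_rows := pvNormalizedRows rows
  let width := PySem.Str.len (PySem.List.pyGetD normalized_rows 0 "")
  let height : Int := (normalized_rows.length : Int)
  let protected1 := (PySem.List.pyRange 0 width).foldl
    (fun s x => PySem.Set.add (PySem.Set.add s (x, (0 : Int))) (x, height - 1)) PySem.Set.empty
  let protected2 := (PySem.List.pyRange 0 height).foldl
    (fun s y => PySem.Set.add (PySem.Set.add s ((0 : Int), y)) (width - 1, y)) protected1
  let protected3 := (PySem.List.enumerate normalized_rows).foldl (fun s yr =>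
    (PySem.List.enumerate yr.2.toList).foldl (fun s xt =>
      if pvTiles.contains xt.2 = false then s
      else pvDeltas.foldl (fun s d =>
        if 0 ≤ xt.1 + d.1 ∧ xt.1 + d.1 < width ∧ 0 ≤ yr.1 + d.2 ∧ yr.1 + d.2 < height
        then PySem.Set.add s (xt.1 + d.1, yr.1 + d.2) else s) s) s) protected2
  pvCanon protected3

-- ===== PORT B =====
-- grid[y][x]; every index use is guarded in range, so the defaults are never read
def pvTileAt (grid : List String) (x y : Int) : Char :=
  PySem.List.pyGetD (PySem.List.pyGetD grid y "").toList x ' '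

def pvProtectedB (width height : Int) (grid : List String) (x y : Int) : Bool :=
  if x = 0 ∨ x = width - 1 ∨ y = 0 ∨ y = height - 1 then true
  else if pvTiles.contains (pvTileAt grid x y) then true
  else pvCards.any (fun d =>
    decide (0 ≤ x + d.1 ∧ x + d.1 < width ∧ 0 ≤ y + d.2 ∧ y + d.2 < height) &&
    pvTiles.contains (pvTileAt grid (x + d.1) (y + d.2)))

def protected_cells_py_alt (rows : List String) : List (Int × Int) :=
  let width := (PySem.List.max? (rows.map (fun r => PySem.Str.len r)) (fun x => x)).getD 0
  let grid := rows.map (fun row => pvLjustHash row width)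
  let height : Int := (grid.length : Int)
  pvCanon (PySem.Set.ofList
    ((PySem.List.pyRange 0 height).flatMap (fun y =>
      (PySem.List.pyRange 0 width).flatMap (fun x =>
        if pvProtectedB width height grid x y then [(x, y)] else []))))

-- ===== PRECONDITION & SPEC =====
-- Pre_ excludes only the empty list, on which A raises ValueError (max() of an empty sequence).
def Pre_protected_cells_py (rows : List String) : Prop := rows ≠ []
instance (rows : List String) : Decidable (Pre_protected_cells_py rows) := by
  unfold Pre_protected_cells_py; infer_instance

def pvWitness_protected_cells_py : List String := ["#T#"]

-- On nonempty inputs whose rows are all empty (zero-width grid), A returns the phantom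
-- out-of-grid cells (0, y) and (-1, y), while B returns the empty set — the intended
-- value for a grid that has no cells.
def D_protected_cells_py (rows : List String) : Prop :=
  rows ≠ [] ∧ (rows.all (fun r => r = "")) = true
instance (rows : List String) : Decidable (D_protected_cells_py rows) := by
  unfold D_protected_cells_py; infer_instance

def Spec_protected_cells_py (rows : List String) (out : List (Int × Int)) : Prop :=
  ¬ D_protected_cells_py rows → out = protected_cells_py_alt rows
instance (rows : List String) (out : List (Int × Int)) : Decidable (Spec_protected_cells_py rows out) := by
  unfold Spec_protected_cells_py; infer_instance

def pvDiffWitness_protected_cells_py : List String := [""]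
def pvDiffWitnessOut_protected_cells_py : (List (Int × Int)) × (List (Int × Int)) :=
  ([(-1, 0), (0, 0)], [])

-- ===== CLAIM =====
def Claim_unchanged_protected_cells_py : Prop :=
  ∀ (rows : List String), Dom_protected_cells_py rows → Pre_protected_cells_py rows →
    Spec_protected_cells_py rows (protected_cells_py rows)
def Claim_changed_protected_cells_py : Prop :=
  Dom_protected_cells_py (pvDiffWitness_protected_cells_py) ∧
  Pre_protected_cells_py (pvDiffWitness_protected_cells_py) ∧
  D_protected_cells_py (pvDiffWitness_protected_cells_py) ∧
  protected_cells_py (pvDiffWitness_protected_cells_py) = pvDiffWitnessOut_protected_cells_py.1 ∧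
  protected_cells_py_alt (pvDiffWitness_protected_cells_py) = pvDiffWitnessOut_protected_cells_py.2 ∧
  pvDiffWitnessOut_protected_cells_py.1 ≠ pvDiffWitnessOut_protected_cells_py.2
def Claim_exact_protected_cells_py : Prop :=
  ∀ (rows : List String), Dom_protected_cells_py rows → Pre_protected_cells_py rows →
    D_protected_cells_py rows → protected_cells_py rows ≠ protected_cells_py_alt rows

-- ===== LEMMAS AND PROOFS =====

-- the three element streams A's three loops insert, and B's gather stream
def pvS1 (w h : Int) : List (Int × Int) :=
  (PySem.List.pyRange 0 w).flatMap (fun x => [(x, (0 : Int)), (x, h - 1)])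
def pvS2 (w h : Int) : List (Int × Int) :=
  (PySem.List.pyRange 0 h).flatMap (fun y => [((0 : Int), y), (w - 1, y)])
def pvS3 (w h : Int) (grid : List String) : List (Int × Int) :=
  (PySem.List.enumerate grid).flatMap (fun yr =>
    (PySem.List.enumerate yr.2.toList).flatMap (fun xt =>
      if pvTiles.contains xt.2 = false then []
      else pvDeltas.flatMap (fun d =>
        if 0 ≤ xt.1 + d.1 ∧ xt.1 + d.1 < w ∧ 0 ≤ yr.1 + d.2 ∧ yr.1 + d.2 < h
        then [(xt.1 + d.1, yr.1 + d.2)] else [])))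
def pvG (w h : Int) (grid : List String) : List (Int × Int) :=
  (PySem.List.pyRange 0 h).flatMap (fun y =>
    (PySem.List.pyRange 0 w).flatMap (fun x =>
      if pvProtectedB w h grid x y then [(x, y)] else []))

def pvStructAt (w h : Int) (grid : List String) (x y : Int) : Prop :=
  0 ≤ x ∧ x < w ∧ 0 ≤ y ∧ y < h ∧ pvTiles.contains (pvTileAt grid x y) = true

-- loop-shape lemmas: A's foldl-add loops as Set.update of a stream
theorem pvFoldlAdd2 {α β : Type} [BEq α] (f g : β → α) :
    ∀ (l : List β) (s : PySem.Set α),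
      l.foldl (fun s x => PySem.Set.add (PySem.Set.add s (f x)) (g x)) s
        = PySem.Set.update s (l.flatMap fun x => [f x, g x])
  | [], s => rfl
  | a :: l, s => by
    rw [List.foldl_cons, pvFoldlAdd2 f g l, List.flatMap_cons]
    rfl

theorem pvFoldlCondAdd {α β : Type} [BEq α] (c : β → Prop) [DecidablePred c] (v : β → α) :
    ∀ (l : List β) (s : PySem.Set α),
      l.foldl (fun s x => if c x then PySem.Set.add s (v x) else s) s
        = PySem.Set.update s (l.flatMap fun x => if c x then [v x] else [])
  | [], s => rfl
  | a :: l, s => by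
    rw [List.foldl_cons, pvFoldlCondAdd c v l, List.flatMap_cons]
    by_cases h : c a
    · simp only [if_pos h]
      rfl
    · simp only [if_neg h, List.nil_append]

theorem pvFoldlUpdate {α β : Type} [BEq α] (F : β → List α) :
    ∀ (l : List β) (s : PySem.Set α),
      l.foldl (fun s x => PySem.Set.update s (F x)) s = PySem.Set.update s (l.flatMap F)
  | [], s => rfl
  | a :: l, s => by
    rw [List.foldl_cons, pvFoldlUpdate F l, List.flatMap_cons]
    exact (List.foldl_append ..).symm

theorem pvUpdateIte {α : Type} [BEq α] (P : Prop) [Decidable P] (s : PySem.Set α) (K : List α) :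
    (if P then s else PySem.Set.update s K) = PySem.Set.update s (if P then [] else K) := by
  split <;> rfl

theorem pvOfListAppend {α : Type} [BEq α] (l1 l2 : List α) :
    PySem.Set.ofList (l1 ++ l2) = PySem.Set.update (PySem.Set.ofList l1) l2 := by
  rw [PySem.Set.ofList_eq_foldl, PySem.Set.ofList_eq_foldl]
  exact List.foldl_append ..

-- A's body is the canon of the set of the three concatenated streams
theorem pvPortAEq (rows : List String) :
    protected_cells_py rows =
      pvCanon (PySem.Set.ofList
        (pvS1 (PySem.Str.len (PySem.List.pyGetD (pvNormalizedRows rows) 0 ""))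
              ((pvNormalizedRows rows).length : Int)
         ++ pvS2 (PySem.Str.len (PySem.List.pyGetD (pvNormalizedRows rows) 0 ""))
              ((pvNormalizedRows rows).length : Int)
         ++ pvS3 (PySem.Str.len (PySem.List.pyGetD (pvNormalizedRows rows) 0 ""))
              ((pvNormalizedRows rows).length : Int) (pvNormalizedRows rows))) := by
  unfold protected_cells_py
  dsimp only
  set nr := pvNormalizedRows rows with hnr
  set W := PySem.Str.len (PySem.List.pyGetD nr 0 "") with hW
  set H := ((nr.length : Nat) : Int) with hH
  rw [pvFoldlAdd2 (fun x => (x, (0 : Int))) (fun x => (x, H - 1))]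
  rw [pvFoldlAdd2 (fun y => ((0 : Int), y)) (fun y => (W - 1, y))]
  have inner_eq : ∀ (yr : Int × String) (xt : Int × Char) (s : PySem.Set (Int × Int)),
      (if pvTiles.contains xt.2 = false then s
       else pvDeltas.foldl (fun s d =>
         if 0 ≤ xt.1 + d.1 ∧ xt.1 + d.1 < W ∧ 0 ≤ yr.1 + d.2 ∧ yr.1 + d.2 < H
         then PySem.Set.add s (xt.1 + d.1, yr.1 + d.2) else s) s)
      = PySem.Set.update s
          (if pvTiles.contains xt.2 = false then []
           else pvDeltas.flatMap (fun d =>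
             if 0 ≤ xt.1 + d.1 ∧ xt.1 + d.1 < W ∧ 0 ≤ yr.1 + d.2 ∧ yr.1 + d.2 < H
             then [(xt.1 + d.1, yr.1 + d.2)] else [])) := by
    intro yr xt s
    rw [pvFoldlCondAdd (fun d => 0 ≤ xt.1 + d.1 ∧ xt.1 + d.1 < W ∧ 0 ≤ yr.1 + d.2 ∧ yr.1 + d.2 < H)
      (fun d => (xt.1 + d.1, yr.1 + d.2)) pvDeltas s]
    exact pvUpdateIte _ s _
  have mid_eq : ∀ (yr : Int × String) (s : PySem.Set (Int × Int)),
      (PySem.List.enumerate yr.2.toList).foldl (fun s xt =>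
        if pvTiles.contains xt.2 = false then s
        else pvDeltas.foldl (fun s d =>
          if 0 ≤ xt.1 + d.1 ∧ xt.1 + d.1 < W ∧ 0 ≤ yr.1 + d.2 ∧ yr.1 + d.2 < H
          then PySem.Set.add s (xt.1 + d.1, yr.1 + d.2) else s) s) s
      = PySem.Set.update s ((PySem.List.enumerate yr.2.toList).flatMap (fun xt =>
          if pvTiles.contains xt.2 = false then []
          else pvDeltas.flatMap (fun d =>
            if 0 ≤ xt.1 + d.1 ∧ xt.1 + d.1 < W ∧ 0 ≤ yr.1 + d.2 ∧ yr.1 + d.2 < H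
            then [(xt.1 + d.1, yr.1 + d.2)] else []))) := by
    intro yr s
    rw [show (fun (s : PySem.Set (Int × Int)) (xt : Int × Char) =>
        if pvTiles.contains xt.2 = false then s
        else pvDeltas.foldl (fun s d =>
          if 0 ≤ xt.1 + d.1 ∧ xt.1 + d.1 < W ∧ 0 ≤ yr.1 + d.2 ∧ yr.1 + d.2 < H
          then PySem.Set.add s (xt.1 + d.1, yr.1 + d.2) else s) s)
      = (fun (s : PySem.Set (Int × Int)) (xt : Int × Char) => PySem.Set.update s
          (if pvTiles.contains xt.2 = false then []
           else pvDeltas.flatMap (fun d =>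
             if 0 ≤ xt.1 + d.1 ∧ xt.1 + d.1 < W ∧ 0 ≤ yr.1 + d.2 ∧ yr.1 + d.2 < H
             then [(xt.1 + d.1, yr.1 + d.2)] else [])))
      from funext fun s => funext fun xt => inner_eq yr xt s]
    exact pvFoldlUpdate _ _ s
  rw [show (fun (s : PySem.Set (Int × Int)) (yr : Int × String) =>
      (PySem.List.enumerate yr.2.toList).foldl (fun s xt =>
        if pvTiles.contains xt.2 = false then s
        else pvDeltas.foldl (fun s d =>
          if 0 ≤ xt.1 + d.1 ∧ xt.1 + d.1 < W ∧ 0 ≤ yr.1 + d.2 ∧ yr.1 + d.2 < H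
          then PySem.Set.add s (xt.1 + d.1, yr.1 + d.2) else s) s) s)
    = (fun (s : PySem.Set (Int × Int)) (yr : Int × String) => PySem.Set.update s
        ((PySem.List.enumerate yr.2.toList).flatMap (fun xt =>
          if pvTiles.contains xt.2 = false then []
          else pvDeltas.flatMap (fun d =>
            if 0 ≤ xt.1 + d.1 ∧ xt.1 + d.1 < W ∧ 0 ≤ yr.1 + d.2 ∧ yr.1 + d.2 < H
            then [(xt.1 + d.1, yr.1 + d.2)] else []))))
    from funext fun s => funext fun yr => mid_eq yr s]
  rw [pvFoldlUpdate]
  rw [show pvS1 W H ++ pvS2 W H ++ pvS3 W H nr = (pvS1 W H ++ pvS2 W H) ++ pvS3 W H nr from by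
    simp [List.append_assoc]]
  rw [pvOfListAppend, pvOfListAppend]
  rfl

-- the canonical emission: two nodup lists with the same members canonize equally
theorem pvCanonCongr (s t : List (Int × Int)) (hs : s.Nodup) (ht : t.Nodup)
    (hmem : ∀ z, z ∈ s ↔ z ∈ t) : pvCanon s = pvCanon t :=
  PySem.List.sorted_eq_sorted_of_perm s t (fun z => toLex z) toLex.injective
    ((List.perm_ext_iff_of_nodup hs ht).mpr hmem)

theorem pvMemCanon (s : List (Int × Int)) (z : Int × Int) : z ∈ pvCanon s ↔ z ∈ s :=
  PySem.List.mem_sorted s (fun z => toLex z) false z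

-- stream membership characterizations
theorem pvMemS1 (w h : Int) (a b : Int) :
    (a, b) ∈ pvS1 w h ↔ (0 ≤ a ∧ a < w ∧ (b = 0 ∨ b = h - 1)) := by
  simp only [pvS1, List.mem_flatMap, PySem.List.mem_pyRange_one, List.mem_cons,
    Prod.mk.injEq, List.not_mem_nil, or_false]
  constructor
  · rintro ⟨x, ⟨hx1, hx2⟩, (⟨rfl, rfl⟩ | ⟨rfl, rfl⟩)⟩ <;> omega
  · rintro ⟨h1, h2, (rfl | rfl)⟩ <;> exact ⟨a, ⟨h1, h2⟩, by omega⟩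

theorem pvMemS2 (w h : Int) (a b : Int) :
    (a, b) ∈ pvS2 w h ↔ (0 ≤ b ∧ b < h ∧ (a = 0 ∨ a = w - 1)) := by
  simp only [pvS2, List.mem_flatMap, PySem.List.mem_pyRange_one, List.mem_cons,
    Prod.mk.injEq, List.not_mem_nil, or_false]
  constructor
  · rintro ⟨y, ⟨hy1, hy2⟩, (⟨rfl, rfl⟩ | ⟨rfl, rfl⟩)⟩ <;> omega
  · rintro ⟨h1, h2, (rfl | rfl)⟩ <;> exact ⟨b, ⟨h1, h2⟩, by omega⟩

-- the tile read by enumerate is pvTileAt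
theorem pvTileAtEq (grid : List String) (k j : Nat) (hk : k < grid.length)
    (hj : j < grid[k].toList.length) :
    pvTileAt grid (j : Int) (k : Int) = grid[k].toList[j] := by
  unfold pvTileAt
  rw [PySem.List.pyGetD_natCast, PySem.List.pyGetD_natCast]
  rw [List.getD_eq_getElem _ _ hk, List.getD_eq_getElem _ _ hj]

theorem pvMemS3 (w h : Int) (grid : List String) (hh : h = (grid.length : Int))
    (hrow : ∀ r ∈ grid, (r.toList.length : Int) = w) (z : Int × Int) :
    z ∈ pvS3 w h grid ↔
      (0 ≤ z.1 ∧ z.1 < w ∧ 0 ≤ z.2 ∧ z.2 < h) ∧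
      ∃ d ∈ pvDeltas, pvStructAt w h grid (z.1 - d.1) (z.2 - d.2) := by
  simp only [pvS3, List.mem_flatMap, PySem.List.mem_enumerate_iff]
  constructor
  · rintro ⟨yr, ⟨k, hk, rfl⟩, xt, ⟨j, hj, rfl⟩, hz⟩
    dsimp only at hj hz
    simp only [zero_add] at hj hz
    split at hz
    · exact absurd hz List.not_mem_nil
    · rename_i htile
      simp only [Bool.not_eq_false] at htile
      simp only [List.mem_flatMap] at hz
      obtain ⟨d, hd, hz⟩ := hz
      split at hz
      · rename_i hb
        rw [List.mem_singleton] at hz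
        subst hz
        have hjw : (j : Int) < w := by
          have := hrow _ (List.getElem_mem hk)
          omega
        refine ⟨⟨hb.1, hb.2.1, hb.2.2.1, hb.2.2.2⟩, d, hd, ?_⟩
        dsimp only
        have ex : (j : Int) + d.1 - d.1 = (j : Int) := by ring
        have ey : (k : Int) + d.2 - d.2 = (k : Int) := by ring
        rw [ex, ey]
        refine ⟨by omega, hjw, by omega, by omega, ?_⟩
        rw [pvTileAtEq grid k j hk hj]
        exact htile
      · exact absurd hz List.not_mem_nil
  · rintro ⟨hzb, d, hd, hx0, hxw, hy0, hyh, htile⟩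
    set sx := z.1 - d.1 with hsx
    set sy := z.2 - d.2 with hsy
    have hkN : sy.toNat < grid.length := by omega
    have hrw := hrow _ (List.getElem_mem hkN)
    have hjN : sx.toNat < grid[sy.toNat].toList.length := by omega
    refine ⟨((sy.toNat : Int), grid[sy.toNat]), ⟨sy.toNat, hkN, by simp⟩,
      ((sx.toNat : Int), grid[sy.toNat].toList[sx.toNat]), ⟨sx.toNat, hjN, by simp⟩, ?_⟩
    have htile' : pvTiles.contains grid[sy.toNat].toList[sx.toNat] = true := by
      rw [← pvTileAtEq grid sy.toNat sx.toNat hkN hjN]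
      have e1 : ((sx.toNat : Nat) : Int) = sx := by omega
      have e2 : ((sy.toNat : Nat) : Int) = sy := by omega
      rw [e1, e2]
      exact htile
    rw [if_neg (by rw [htile']; simp)]
    simp only [List.mem_flatMap]
    refine ⟨d, hd, ?_⟩
    dsimp only
    have ex : ((sx.toNat : Nat) : Int) + d.1 = z.1 := by omega
    have ey : ((sy.toNat : Nat) : Int) + d.2 = z.2 := by omega
    rw [ex, ey, if_pos hzb, List.mem_singleton]

-- B's gather predicate, on in-bounds cells, reads: border or some delta hits a structure
theorem pvNegCard : ∀ c ∈ pvCards, ((-c.1, -c.2) : Int × Int) ∈ pvDeltas := by decide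

theorem pvNegDelta : ∀ d ∈ pvDeltas, d ≠ ((0 : Int), (0 : Int)) →
    ((-d.1, -d.2) : Int × Int) ∈ pvCards := by decide

theorem pvProtectedBIff (w h : Int) (grid : List String) (x y : Int)
    (hx : 0 ≤ x ∧ x < w) (hy : 0 ≤ y ∧ y < h) :
    pvProtectedB w h grid x y = true ↔
      ((x = 0 ∨ x = w - 1 ∨ y = 0 ∨ y = h - 1) ∨
       ∃ d ∈ pvDeltas, pvStructAt w h grid (x - d.1) (y - d.2)) := by
  unfold pvProtectedB
  by_cases hb : x = 0 ∨ x = w - 1 ∨ y = 0 ∨ y = h - 1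
  · simp only [if_pos hb, true_iff]
    exact Or.inl hb
  · rw [if_neg hb]
    by_cases hself : pvTiles.contains (pvTileAt grid x y) = true
    · rw [if_pos hself]
      simp only [true_iff]
      refine Or.inr ⟨(0, 0), by simp [pvDeltas], ?_⟩
      dsimp only
      rw [sub_zero, sub_zero]
      exact ⟨hx.1, hx.2, hy.1, hy.2, hself⟩
    · rw [if_neg hself, List.any_eq_true]
      constructor
      · rintro ⟨c, hc, hcond⟩
        rw [Bool.and_eq_true, decide_eq_true_eq] at hcond
        obtain ⟨hin, htl⟩ := hcond
        refine Or.inr ⟨(-c.1, -c.2), pvNegCard c hc, ?_⟩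
        dsimp only
        rw [sub_neg_eq_add, sub_neg_eq_add]
        exact ⟨hin.1, hin.2.1, hin.2.2.1, hin.2.2.2, htl⟩
      · rintro (hb' | ⟨d, hd, hstruct⟩)
        · exact absurd hb' hb
        · by_cases hd0 : d = ((0 : Int), (0 : Int))
          · subst hd0
            dsimp only at hstruct
            rw [sub_zero, sub_zero] at hstruct
            exact absurd hstruct.2.2.2.2 hself
          · obtain ⟨hs1, hs2, hs3, hs4, hst⟩ := hstruct
            refine ⟨(-d.1, -d.2), pvNegDelta d hd hd0, ?_⟩
            rw [Bool.and_eq_true, decide_eq_true_eq]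
            dsimp only
            have ex : x + -d.1 = x - d.1 := by ring
            have ey : y + -d.2 = y - d.2 := by ring
            rw [ex, ey]
            exact ⟨⟨hs1, hs2, hs3, hs4⟩, hst⟩

theorem pvMemG (w h : Int) (grid : List String) (z : Int × Int) :
    z ∈ pvG w h grid ↔
      (0 ≤ z.1 ∧ z.1 < w ∧ 0 ≤ z.2 ∧ z.2 < h) ∧ pvProtectedB w h grid z.1 z.2 = true := by
  simp only [pvG, List.mem_flatMap, PySem.List.mem_pyRange_one]
  constructor
  · rintro ⟨y, hy, x, hx, hz⟩
    split at hz
    · rename_i hp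
      rw [List.mem_singleton] at hz
      subst hz
      exact ⟨⟨hx.1, hx.2, hy.1, hy.2⟩, hp⟩
    · exact absurd hz List.not_mem_nil
  · rintro ⟨⟨h1, h2, h3, h4⟩, hp⟩
    exact ⟨z.2, ⟨h3, h4⟩, z.1, ⟨h1, h2⟩, by rw [if_pos hp]; simp⟩

-- the two streams have the same members (on a genuine grid: w ≥ 1, h ≥ 1)
theorem pvStreamsMem (w h : Int) (grid : List String) (hw : 1 ≤ w) (hh1 : 1 ≤ h)
    (hh : h = (grid.length : Int)) (hrow : ∀ r ∈ grid, (r.toList.length : Int) = w)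
    (z : Int × Int) :
    z ∈ pvS1 w h ++ pvS2 w h ++ pvS3 w h grid ↔ z ∈ pvG w h grid := by
  obtain ⟨a, b⟩ := z
  rw [List.append_assoc]
  simp only [List.mem_append]
  rw [pvMemS1, pvMemS2, pvMemS3 w h grid hh hrow, pvMemG]
  dsimp only
  constructor
  · rintro (⟨h1, h2, h3⟩ | ⟨h1, h2, h3⟩ | ⟨⟨h1, h2, h3, h4⟩, hex⟩)
    · have hbnd : 0 ≤ a ∧ a < w ∧ 0 ≤ b ∧ b < h := by omega
      exact ⟨hbnd, (pvProtectedBIff w h grid a b ⟨hbnd.1, hbnd.2.1⟩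
        ⟨hbnd.2.2.1, hbnd.2.2.2⟩).mpr (Or.inl (by omega))⟩
    · have hbnd : 0 ≤ a ∧ a < w ∧ 0 ≤ b ∧ b < h := by omega
      exact ⟨hbnd, (pvProtectedBIff w h grid a b ⟨hbnd.1, hbnd.2.1⟩
        ⟨hbnd.2.2.1, hbnd.2.2.2⟩).mpr (Or.inl (by omega))⟩
    · exact ⟨⟨h1, h2, h3, h4⟩,
        (pvProtectedBIff w h grid a b ⟨h1, h2⟩ ⟨h3, h4⟩).mpr (Or.inr hex)⟩
  · rintro ⟨⟨h1, h2, h3, h4⟩, hp⟩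
    rcases (pvProtectedBIff w h grid a b ⟨h1, h2⟩ ⟨h3, h4⟩).mp hp with hbord | hex
    · rcases hbord with hc | hc | hc | hc
      · exact Or.inr (Or.inl ⟨h3, h4, Or.inl hc⟩)
      · exact Or.inr (Or.inl ⟨h3, h4, Or.inr hc⟩)
      · exact Or.inl ⟨h1, h2, Or.inl hc⟩
      · exact Or.inl ⟨h1, h2, Or.inr hc⟩
    · exact Or.inr (Or.inr ⟨⟨h1, h2, h3, h4⟩, hex⟩)

-- width / grid facts (outside D_)
theorem pvW0_isMax (rows : List String) (r : String) (hr : r ∈ rows) :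
    PySem.Str.len r ≤ (PySem.List.max? (rows.map (fun r => PySem.Str.len r)) (fun x => x)).getD 0 := by
  cases e : PySem.List.max? (rows.map (fun r => PySem.Str.len r)) (fun x => x) with
  | none =>
    rw [PySem.List.max?_eq_none_iff] at e
    exact absurd (List.mem_map_of_mem hr) (e ▸ List.not_mem_nil)
  | some m =>
    simpa using PySem.List.max?_isMax e (PySem.Str.len r) (List.mem_map_of_mem hr)

theorem pvLenLjust (s : String) (w : Int) (h1 : PySem.Str.len s ≤ w) :
    PySem.Str.len (pvLjustHash s w) = w := by
  rw [PySem.Str.len_eq] at h1 ⊢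
  unfold pvLjustHash
  simp only [String.toList_ofList, List.length_append, List.length_replicate]
  push_cast
  omega

theorem pvWidthEq (rows : List String) (hne : rows ≠ []) :
    PySem.Str.len (PySem.List.pyGetD (pvNormalizedRows rows) 0 "") =
      (PySem.List.max? (rows.map (fun r => PySem.Str.len r)) (fun x => x)).getD 0 := by
  obtain ⟨r, rest, rfl⟩ := List.exists_cons_of_ne_nil hne
  unfold pvNormalizedRows
  dsimp only
  rw [List.map_cons, show ((0 : Int)) = ((0 : Nat) : Int) from rfl, PySem.List.pyGetD_natCast]
  rw [List.getD_cons_zero]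
  exact pvLenLjust r _ (pvW0_isMax (r :: rest) r List.mem_cons_self)

theorem pvSpecMain (rows : List String) (hpre : rows ≠ [])
    (hnd : ¬ D_protected_cells_py rows) :
    protected_cells_py rows = protected_cells_py_alt rows := by
  have hex : ∃ r ∈ rows, r ≠ "" := by
    unfold D_protected_cells_py at hnd
    simp only [hpre, ne_eq, not_false_iff, true_and, List.all_eq_true] at hnd
    push Not at hnd
    simpa using hnd
  set W0 := (PySem.List.max? (rows.map (fun r => PySem.Str.len r)) (fun x => x)).getD 0 with hW0
  have hw : 1 ≤ W0 := by
    obtain ⟨r, hr, hrne⟩ := hex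
    have h1 := pvW0_isMax rows r hr
    have h2 : 1 ≤ PySem.Str.len r := by
      rw [PySem.Str.len_eq]
      have : r.toList ≠ [] := by simp [hrne]
      have : 0 < r.toList.length := List.length_pos_iff.mpr this
      omega
    omega
  have hgrid : pvNormalizedRows rows = rows.map (fun row => pvLjustHash row W0) := by
    unfold pvNormalizedRows; rfl
  have hlen : 1 ≤ ((pvNormalizedRows rows).length : Int) := by
    rw [hgrid, List.length_map]
    have : 0 < rows.length := List.length_pos_iff.mpr hpre
    omega
  have hrow : ∀ r ∈ pvNormalizedRows rows, (r.toList.length : Int) = W0 := by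
    intro r hr
    rw [hgrid, List.mem_map] at hr
    obtain ⟨r0, hr0, rfl⟩ := hr
    have := pvLenLjust r0 W0 (pvW0_isMax rows r0 hr0)
    rw [PySem.Str.len_eq] at this
    exact this
  rw [pvPortAEq, pvWidthEq rows hpre, ← hW0]
  unfold protected_cells_py_alt
  dsimp only
  rw [← hW0, ← hgrid]
  exact pvCanonCongr _ _ (PySem.Set.nodup_ofList _) (PySem.Set.nodup_ofList _)
    (fun z => by
      rw [PySem.Set.mem_ofList, PySem.Set.mem_ofList]
      exact pvStreamsMem W0 _ (pvNormalizedRows rows) hw hlen rfl hrow z)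

-- inside D_: A keeps phantom cells, B is empty
theorem pvW0_zero (rows : List String) (hall : (rows.all (fun r => r = "")) = true) :
    (PySem.List.max? (rows.map (fun r => PySem.Str.len r)) (fun x => x)).getD 0 = 0 := by
  cases e : PySem.List.max? (rows.map (fun r => PySem.Str.len r)) (fun x => x) with
  | none => rfl
  | some m =>
    have hm := PySem.List.max?_mem e
    simp only [List.mem_map] at hm
    obtain ⟨r, hr, rfl⟩ := hm
    have : r = "" := by
      rw [List.all_eq_true] at hall
      simpa using hall r hr
    subst this
    simp [PySem.Str.len_eq]

theorem pvAltEmpty (rows : List String) (hall : (rows.all (fun r => r = "")) = true) :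
    protected_cells_py_alt rows = [] := by
  unfold protected_cells_py_alt
  dsimp only
  rw [pvW0_zero rows hall]
  have : ∀ y, (PySem.List.pyRange 0 (0 : Int)).flatMap (fun x =>
      if pvProtectedB 0 ((rows.map (fun row => pvLjustHash row 0)).length : Int)
        (rows.map (fun row => pvLjustHash row 0)) x y then [(x, y)] else []) = [] := by
    intro y
    rw [PySem.List.pyRange_one_eq_nil (le_refl (0 : Int))]
    rfl
  rw [List.flatMap_congr (fun y _ => this y)]
  rw [show List.flatMap (fun _ => ([] : List (Int × Int)))
      (PySem.List.pyRange 0 (((rows.map (fun row => pvLjustHash row 0)).length : Nat) : Int))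
      = [] from by simp]
  rfl

theorem pvAEmptyNe (rows : List String) (hpre : rows ≠ []) :
    protected_cells_py rows ≠ [] := by
  intro hEq
  have hmem : ((0 : Int), (0 : Int)) ∈ protected_cells_py rows := by
    rw [pvPortAEq, pvMemCanon, PySem.Set.mem_ofList]
    rw [List.append_assoc]
    refine List.mem_append_right _ (List.mem_append_left _ ?_)
    rw [pvMemS2]
    have : 0 < rows.length := List.length_pos_iff.mpr hpre
    have : 0 < (pvNormalizedRows rows).length := by
      unfold pvNormalizedRows; dsimp only; rw [List.length_map]; omega
    omega
  rw [hEq] at hmem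
  exact List.not_mem_nil hmem

-- ===== VERDICT =====
theorem protected_cells_py_spec : Claim_unchanged_protected_cells_py := by
  unfold Claim_unchanged_protected_cells_py
  intro rows _ hpre
  unfold Spec_protected_cells_py
  intro hnd
  exact pvSpecMain rows hpre hnd

theorem protected_cells_py_changed : Claim_changed_protected_cells_py := by
  unfold Claim_changed_protected_cells_py; decide

theorem protected_cells_py_tight : Claim_exact_protected_cells_py := by
  unfold Claim_exact_protected_cells_py
  intro rows _ hpre hd
  rw [pvAltEmpty rows hd.2]
  exact pvAEmptyNe rows hpre
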